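-- pv_equiv track=rewrite | github.com/ishangote/Coding-Interviews-Python | Leetcode/1567 Maximum Length of Subarray With Positive Product/longest_positive_product_subarray.py | longest_positive_product_subarray
-- ===== SOURCE A (Python) =====
-- def longest_subarray_helper(lo, hi, first_negative, last_negative, count_negatives):
--     if count_negatives % 2 == 0:
--         return hi - lo + 1
--
--     return max((last_negative - 1) - lo, hi - (first_negative + 1)) + 1
--
-- def longest_positive_product_subarray(nums):
--     count_negatives = 0
--     first_negative, last_negative = -1, -1
--     lo, hi = 0, 0
--     res = 0
--
--     while hi < len(nums):
--         if nums[hi] == 0: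
--             res = max(
--                 res,
--                 longest_subarray_helper(
--                     lo, hi - 1, first_negative, last_negative, count_negatives
--                 ),
--             )
--             lo = hi + 1
--             count_negatives = 0
--             first_negative, last_negative = -1, -1
--
--         else:
--             if nums[hi] < 0:
--                 count_negatives += 1
--
--                 if first_negative == -1:
--                     first_negative = hi
--                 last_negative = hi
--
--             res = max(
--                 res,
--                 longest_subarray_helper(
--                     lo, hi, first_negative, last_negative, count_negatives
--                 ),
--             )
--
--         hi += 1
--
--     return res
-- ===== SOURCE B (Python) =====
-- def longest_positive_product_subarray(nums):
--     pos = neg = res = 0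
--     for x in nums:
--         if x == 0:
--             pos = neg = 0
--         elif x > 0:
--             pos += 1
--             neg = neg + 1 if neg > 0 else 0
--         else:
--             pos, neg = (neg + 1 if neg > 0 else 0), pos + 1
--         res = max(res, pos)
--     return res
-- ===== Notes on version B (the rewrite author's own statement) =====
-- stated objective: simpler
-- what changed: Replaces A's per-segment bookkeeping (segment start, first/last negative index, negative count, and a closed-form helper) with the standard incremental pos/neg DP: two running lengths of the longest positive- and negative-product subarrays ending at the current element, updated in O(1) per step.
import Mathlib
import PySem

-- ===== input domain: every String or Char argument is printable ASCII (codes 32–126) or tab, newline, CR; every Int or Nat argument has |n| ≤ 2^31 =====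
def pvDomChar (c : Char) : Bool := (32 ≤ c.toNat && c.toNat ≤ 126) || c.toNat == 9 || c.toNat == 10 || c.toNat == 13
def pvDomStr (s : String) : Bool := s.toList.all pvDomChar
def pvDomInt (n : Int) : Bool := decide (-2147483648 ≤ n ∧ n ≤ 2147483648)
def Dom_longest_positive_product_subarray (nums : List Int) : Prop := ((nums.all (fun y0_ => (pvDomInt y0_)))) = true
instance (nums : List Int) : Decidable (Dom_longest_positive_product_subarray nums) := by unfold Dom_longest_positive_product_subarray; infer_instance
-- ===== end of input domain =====

-- B replaces A's boundary/first-last-negative bookkeeping with the standard incremental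
-- pos/neg DP (longest positive- and negative-product suffix lengths) — simpler, same one pass.

-- ===== PORT A =====
-- helper: '%' here is on count ≥ 0 with divisor 2, where Lean's emod agrees with Python's mod
def pvHelperA (lo hi first_negative last_negative count_negatives : Int) : Int :=
  if count_negatives % 2 = 0 then hi - lo + 1
  else max ((last_negative - 1) - lo) (hi - (first_negative + 1)) + 1

-- the while loop: one recursive step per element, hi is the running index
def pvLoopA : List Int → Int → Int → Int → Int → Int → Int → Int
  | [], _, _, _, _, _, res => res
  | x :: rest, hi, count, first, last, lo, res =>
    if x = 0 then
      pvLoopA rest (hi + 1) 0 (-1) (-1) (hi + 1)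
        (max res (pvHelperA lo (hi - 1) first last count))
    else
      let count' := if x < 0 then count + 1 else count
      let first' := if x < 0 then (if first = -1 then hi else first) else first
      let last'  := if x < 0 then hi else last
      pvLoopA rest (hi + 1) count' first' last' lo
        (max res (pvHelperA lo hi first' last' count'))

def longest_positive_product_subarray (nums : List Int) : Int :=
  pvLoopA nums 0 0 (-1) (-1) 0 0

-- ===== PORT B =====
def pvLoopB : List Int → Int → Int → Int → Int
  | [], _, _, res => res
  | x :: rest, pos, neg, res =>
    let pn : Int × Int :=
      if x = 0 then (0, 0)
      else if x > 0 then (pos + 1, if neg > 0 then neg + 1 else 0)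
      else (if neg > 0 then neg + 1 else 0, pos + 1)
    pvLoopB rest pn.1 pn.2 (max res pn.1)

def longest_positive_product_subarray_alt (nums : List Int) : Int :=
  pvLoopB nums 0 0 0

-- ===== PRECONDITION & SPEC =====
def Spec_longest_positive_product_subarray (nums : List Int) (out : Int) : Prop := out = longest_positive_product_subarray_alt nums
instance (nums : List Int) (out : Int) : Decidable (Spec_longest_positive_product_subarray nums out) := by unfold Spec_longest_positive_product_subarray; infer_instance

-- ===== CLAIM (what is proved, stated in full; the proofs are below) =====
def Claim_equal_longest_positive_product_subarray : Prop := ∀ (nums : List Int), Dom_longest_positive_product_subarray nums → Spec_longest_positive_product_subarray nums (longest_positive_product_subarray nums)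

-- ===== LEMMAS AND PROOFS =====

-- Invariant tying A's segment bookkeeping to B's pos/neg DP after any processed prefix
def pvInv (count first last lo hi res pos neg : Int) : Prop :=
  pos ≤ res ∧ 0 ≤ pos ∧ 0 ≤ lo ∧ lo ≤ hi ∧ 0 ≤ count ∧
  ( (count % 2 = 0 ∧ pos = hi - lo ∧
      ((count = 0 ∧ first = -1 ∧ last = -1 ∧ neg = 0) ∨
       (2 ≤ count ∧ lo ≤ first ∧ first < last ∧ last ≤ hi - 1 ∧ neg = hi - 1 - first)))
    ∨ (count % 2 = 1 ∧ lo ≤ first ∧ first ≤ last ∧ last ≤ hi - 1 ∧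
       pos = hi - 1 - first ∧ neg = hi - lo ∧ last - lo ≤ res) )

-- one-step unfoldings of the two loops
theorem pvLoopA_zero (rest : List Int) (hi count first last lo res : Int) :
    pvLoopA (0 :: rest) hi count first last lo res =
      pvLoopA rest (hi + 1) 0 (-1) (-1) (hi + 1) (max res (pvHelperA lo (hi - 1) first last count)) := by
  simp [pvLoopA]

theorem pvLoopA_pos {x : Int} (hx : 0 < x) (rest : List Int) (hi count first last lo res : Int) :
    pvLoopA (x :: rest) hi count first last lo res =
      pvLoopA rest (hi + 1) count first last lo (max res (pvHelperA lo hi first last count)) := by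
  simp only [pvLoopA]
  rw [if_neg (by omega : ¬ x = 0)]
  simp only [if_neg (by omega : ¬ x < 0)]

theorem pvLoopA_neg {x : Int} (hx : x < 0) (rest : List Int) (hi count first last lo res : Int) :
    pvLoopA (x :: rest) hi count first last lo res =
      pvLoopA rest (hi + 1) (count + 1) (if first = -1 then hi else first) hi lo
        (max res (pvHelperA lo hi (if first = -1 then hi else first) hi (count + 1))) := by
  simp only [pvLoopA]
  rw [if_neg (by omega : ¬ x = 0)]
  simp only [if_pos hx]

theorem pvLoopB_zero (rest : List Int) (pos neg res : Int) :
    pvLoopB (0 :: rest) pos neg res = pvLoopB rest 0 0 (max res 0) := by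
  simp [pvLoopB]

theorem pvLoopB_pos {x : Int} (hx : 0 < x) (rest : List Int) (pos neg res : Int) :
    pvLoopB (x :: rest) pos neg res =
      pvLoopB rest (pos + 1) (if neg > 0 then neg + 1 else 0) (max res (pos + 1)) := by
  simp only [pvLoopB]
  rw [if_neg (by omega : ¬ x = 0), if_pos hx]

theorem pvLoopB_neg {x : Int} (hx : x < 0) (rest : List Int) (pos neg res : Int) :
    pvLoopB (x :: rest) pos neg res =
      pvLoopB rest (if neg > 0 then neg + 1 else 0) (pos + 1)
        (max res (if neg > 0 then neg + 1 else 0)) := by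
  simp only [pvLoopB]
  rw [if_neg (by omega : ¬ x = 0), if_neg (by omega : ¬ x > 0)]

theorem pvLoop_eq : ∀ (rest : List Int) (count first last lo hi res pos neg : Int),
    pvInv count first last lo hi res pos neg →
    pvLoopA rest hi count first last lo res = pvLoopB rest pos neg res := by
  intro rest
  induction rest with
  | nil => intro _ _ _ _ _ _ _ _ _; rfl
  | cons x rest ih =>
    intro count first last lo hi res pos neg hInv
    obtain ⟨h1, h2, h3, h4, h5, hcase⟩ := hInv
    rcases lt_trichotomy x 0 with hxn | hx0 | hxp
    · -- negative element
      rw [pvLoopA_neg hxn, pvLoopB_neg hxn]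
      rcases hcase with ⟨hp, hpos, hrest⟩ | ⟨hp, hf1, hf2, hf3, hpos, hneg, hlast⟩
      · rcases hrest with ⟨hc0, hfa, hla, hna⟩ | ⟨hc2, hg1, hg2, hg3, hng⟩
        · -- first negative of the segment
          rw [if_pos hfa, if_neg (show ¬ neg > 0 by omega)]
          have he : max res (pvHelperA lo hi hi hi (count + 1)) = max res 0 := by
            unfold pvHelperA; rw [if_neg (by omega)]; omega
          rw [he]
          exact ih (count + 1) hi hi lo (hi + 1) (max res 0) 0 (pos + 1)
            ⟨by omega, by omega, by omega, by omega, by omega,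
             Or.inr ⟨by omega, by omega, by omega, by omega, by omega, by omega, by omega⟩⟩
        · -- later negative, even → odd count
          rw [if_neg (show ¬ first = -1 by omega), if_pos (show neg > 0 by omega)]
          have he : max res (pvHelperA lo hi first hi (count + 1)) = max res (neg + 1) := by
            unfold pvHelperA; rw [if_neg (by omega)]; omega
          rw [he]
          exact ih (count + 1) first hi lo (hi + 1) (max res (neg + 1)) (neg + 1) (pos + 1)
            ⟨by omega, by omega, by omega, by omega, by omega,
             Or.inr ⟨by omega, hg1, by omega, by omega, by omega, by omega, by omega⟩⟩
      · -- odd → even count (≥ 2)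
        rw [if_neg (show ¬ first = -1 by omega), if_pos (show neg > 0 by omega)]
        have he : max res (pvHelperA lo hi first hi (count + 1)) = max res (neg + 1) := by
          unfold pvHelperA; rw [if_pos (show (count + 1) % 2 = 0 by omega)]; omega
        rw [he]
        exact ih (count + 1) first hi lo (hi + 1) (max res (neg + 1)) (neg + 1) (pos + 1)
          ⟨by omega, by omega, by omega, by omega, by omega,
           Or.inl ⟨by omega, by omega, Or.inr ⟨by omega, hf1, by omega, by omega, by omega⟩⟩⟩
    · -- zero element: both recorded values are already ≤ res
      subst hx0
      rw [pvLoopA_zero, pvLoopB_zero]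
      have he : max res (pvHelperA lo (hi - 1) first last count) = max res 0 := by
        unfold pvHelperA
        rcases hcase with ⟨hp, hpos, hrest⟩ | ⟨hp, hf1, hf2, hf3, hpos, hneg, hlast⟩
        · rw [if_pos hp]; omega
        · rw [if_neg (by omega)]; omega
      rw [he]
      exact ih 0 (-1) (-1) (hi + 1) (hi + 1) (max res 0) 0 0
        ⟨by omega, by omega, by omega, by omega, by omega, Or.inl ⟨by omega, by omega, Or.inl ⟨rfl, rfl, rfl, rfl⟩⟩⟩
    · -- positive element
      rw [pvLoopA_pos hxp, pvLoopB_pos hxp]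
      rcases hcase with ⟨hp, hpos, hrest⟩ | ⟨hp, hf1, hf2, hf3, hpos, hneg, hlast⟩
      · have he : max res (pvHelperA lo hi first last count) = max res (pos + 1) := by
          unfold pvHelperA; rw [if_pos hp]; omega
        rw [he]
        rcases hrest with ⟨hc0, hfa, hla, hna⟩ | ⟨hc2, hg1, hg2, hg3, hng⟩
        · rw [if_neg (by omega : ¬ neg > 0)]
          exact ih count first last lo (hi + 1) (max res (pos + 1)) (pos + 1) 0
            ⟨by omega, by omega, by omega, by omega, by omega,
             Or.inl ⟨hp, by omega, Or.inl ⟨hc0, hfa, hla, rfl⟩⟩⟩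
        · rw [if_pos (by omega : neg > 0)]
          exact ih count first last lo (hi + 1) (max res (pos + 1)) (pos + 1) (neg + 1)
            ⟨by omega, by omega, by omega, by omega, by omega,
             Or.inl ⟨hp, by omega, Or.inr ⟨hc2, hg1, hg2, by omega, by omega⟩⟩⟩
      · have he : max res (pvHelperA lo hi first last count) = max res (pos + 1) := by
          unfold pvHelperA; rw [if_neg (by omega)]; omega
        rw [he, if_pos (by omega : neg > 0)]
        exact ih count first last lo (hi + 1) (max res (pos + 1)) (pos + 1) (neg + 1)
          ⟨by omega, by omega, by omega, by omega, by omega,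
           Or.inr ⟨hp, hf1, hf2, by omega, by omega, by omega, by omega⟩⟩

-- ===== VERDICT (by name: the statement is the Claim_ definition above) =====
theorem longest_positive_product_subarray_spec : Claim_equal_longest_positive_product_subarray := by
  intro nums _
  unfold Spec_longest_positive_product_subarray longest_positive_product_subarray longest_positive_product_subarray_alt
  exact pvLoop_eq nums 0 (-1) (-1) 0 0 0 0 0
    ⟨le_refl 0, le_refl 0, le_refl 0, le_refl 0, le_refl 0,
     Or.inl ⟨rfl, by omega, Or.inl ⟨rfl, rfl, rfl, rfl⟩⟩⟩
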